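-- pv_equiv track=rewrite | github.com/masoudhashemi/vine-verifiers | verifiers/envs/imprisoned/imprisoned_multistep_env.py | _match_action
-- ===== SOURCE A (Python) =====
-- from typing import List, Dict, Any, Tuple
--
-- def _match_action(user_action: str, available_actions: Dict[str, Dict[str, Any]]) -> str:
--     """Match the user's action to an available action."""
--     if not available_actions:
--         return None
--
--     # Clean up user action - remove whitespace and convert to lowercase
--     user_action = user_action.strip().lower()
--
--     # Try exact match first (case-insensitive)
--     for action in available_actions:
--         if action.lower() == user_action:
--             return action
--
--     # Try partial match where the user's action contains the full action name
--     for action in available_actions: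
--         if action.lower() in user_action:
--             return action
--
--     # Try partial match where the action contains the user's input
--     # Only if user input is at least 4 characters to avoid too loose matching
--     if len(user_action) >= 4:
--         for action in available_actions:
--             if user_action in action.lower():
--                 return action
--
--     # Try matching against descriptions
--     for action, details in available_actions.items():
--         description = details.get("description", "").lower()
--         if user_action in description:
--             return action
--
--     # If no match found, return None
--     return None
-- ===== SOURCE B (Python) =====
-- def _match_action(user_action, available_actions):
--     """Match the user's action to an available action (single pass, best-tier tracking)."""
--     user_action = user_action.strip().lower()
--     best = None  # (tier, action); lower tier = stronger match
--     for action, details in available_actions.items():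
--         action_lower = action.lower()
--         if action_lower == user_action:
--             tier = 1
--         elif action_lower in user_action:
--             tier = 2
--         elif len(user_action) >= 4 and user_action in action_lower:
--             tier = 3
--         elif user_action in details.get("description", "").lower():
--             tier = 4
--         else:
--             continue
--         if best is None or tier < best[0]:
--             best = (tier, action)
--     return best[1] if best is not None else None
-- ===== Notes on version B (the rewrite author's own statement) =====
-- stated objective: alternative
-- what changed: A's four sequential scans over the actions (exact match, key-in-input, input-in-key, input-in-description) are replaced by a single pass that assigns each action its lowest matching tier and keeps the first action with the strictly smallest tier.
import Mathlib
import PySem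

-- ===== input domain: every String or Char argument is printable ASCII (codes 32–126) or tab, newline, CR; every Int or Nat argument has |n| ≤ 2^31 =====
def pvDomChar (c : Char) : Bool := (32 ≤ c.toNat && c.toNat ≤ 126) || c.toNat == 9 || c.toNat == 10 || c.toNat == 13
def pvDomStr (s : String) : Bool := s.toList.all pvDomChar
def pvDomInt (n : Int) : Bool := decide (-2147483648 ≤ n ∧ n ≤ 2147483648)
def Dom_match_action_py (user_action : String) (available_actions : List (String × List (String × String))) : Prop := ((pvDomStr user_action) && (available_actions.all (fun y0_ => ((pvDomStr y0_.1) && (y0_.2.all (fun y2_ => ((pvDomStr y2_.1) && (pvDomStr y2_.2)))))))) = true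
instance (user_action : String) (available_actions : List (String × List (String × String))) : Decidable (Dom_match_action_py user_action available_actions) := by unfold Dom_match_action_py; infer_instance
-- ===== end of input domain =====

-- B replaces A's four sequential scans by ONE pass that tracks the best (lowest) match tier seen so far
-- (strict-< update keeps the first action of the winning tier); same return value, different decomposition.

-- ===== PORT A =====
-- A: four passes (exact key, key-in-input, input-in-key guarded by len ≥ 4, input-in-description), first hit wins.
def match_action_py (user_action : String) (available_actions : List (String × List (String × String))) : Option String :=
  if available_actions = [] then none
  else
    let ua := PySem.Str.lower (PySem.Str.strip user_action)
    match available_actions.find? (fun x => PySem.Str.lower x.1 == ua) with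
    | some x => some x.1
    | none =>
      match available_actions.find? (fun x => PySem.Str.isIn (PySem.Str.lower x.1) ua) with
      | some x => some x.1
      | none =>
        match (if 4 ≤ PySem.Str.len ua then
                 available_actions.find? (fun x => PySem.Str.isIn ua (PySem.Str.lower x.1))
               else none) with
        | some x => some x.1
        | none =>
          (available_actions.find? (fun x =>
             PySem.Str.isIn ua (PySem.Str.lower (PySem.Dict.getD ⟨x.2⟩ "description" "")))).map (·.1)

-- ===== PORT B =====
-- tier of one action: 1 exact, 2 key ⊆ input, 3 input ⊆ key (len ≥ 4), 4 input ⊆ description, none otherwise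
def pvTier (ua : String) (x : String × List (String × String)) : Option Nat :=
  let al := PySem.Str.lower x.1
  if al == ua then some 1
  else if PySem.Str.isIn al ua then some 2
  else if decide (4 ≤ PySem.Str.len ua) && PySem.Str.isIn ua al then some 3
  else if PySem.Str.isIn ua (PySem.Str.lower (PySem.Dict.getD ⟨x.2⟩ "description" "")) then some 4
  else none

def pvStep (ua : String) (best : Option (Nat × String)) (x : String × List (String × String)) :
    Option (Nat × String) :=
  match pvTier ua x with
  | none => best
  | some t =>
    match best with
    | none => some (t, x.1)
    | some (tb, _) => if t < tb then some (t, x.1) else best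

def match_action_py_alt (user_action : String) (available_actions : List (String × List (String × String))) : Option String :=
  let ua := PySem.Str.lower (PySem.Str.strip user_action)
  (available_actions.foldl (pvStep ua) none).map (·.2)

-- ===== PRECONDITION & SPEC =====
def Spec_match_action_py (user_action : String) (available_actions : List (String × List (String × String))) (out : Option String) : Prop := out = match_action_py_alt user_action available_actions
instance (user_action : String) (available_actions : List (String × List (String × String))) (out : Option String) : Decidable (Spec_match_action_py user_action available_actions out) := by unfold Spec_match_action_py; infer_instance

-- ===== CLAIM (what is proved, stated in full; the proofs are below) =====
def Claim_equal_match_action_py : Prop := ∀ (user_action : String) (available_actions : List (String × List (String × String))), Dom_match_action_py user_action available_actions → Spec_match_action_py user_action available_actions (match_action_py user_action available_actions)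

-- ===== LEMMAS AND PROOFS =====

-- generic machinery: first-element-of-minimal-tier selection
def pvCombine : Option (Nat × String) → Option (Nat × String) → Option (Nat × String)
  | none, c => c
  | some b, none => some b
  | some b, some c => if c.1 < b.1 then some c else some b

def pvOmin : Option Nat → Option Nat → Option Nat
  | none, b => b
  | some t, none => some t
  | some t, some s => some (min t s)

def pvF {α : Type} (q1 q2 q3 q4 : α → Bool) (x : α) : Option Nat :=
  if q1 x then some 1 else if q2 x then some 2 else if q3 x then some 3
  else if q4 x then some 4 else none

def pvMinT {α : Type} (f : α → Option Nat) : List α → Option Nat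
  | [] => none
  | x :: l => pvOmin (f x) (pvMinT f l)

def pvStepG {α : Type} (f : α → Option Nat) (key : α → String)
    (b : Option (Nat × String)) (x : α) : Option (Nat × String) :=
  pvCombine b ((f x).map (fun t => (t, key x)))

def pvBest {α : Type} (f : α → Option Nat) (key : α → String) (l : List α) :
    Option (Nat × String) := l.foldl (pvStepG f key) none

def pvChain {α : Type} (q1 q2 q3 q4 : α → Bool) (key : α → String) (l : List α) : Option String :=
  match l.find? q1 with
  | some x => some (key x)
  | none =>
    match l.find? q2 with
    | some x => some (key x)
    | none =>
      match l.find? q3 with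
      | some x => some (key x)
      | none => (l.find? q4).map key

lemma pvCombine_none_left (c : Option (Nat × String)) : pvCombine none c = c := rfl

lemma pvCombine_none_right (c : Option (Nat × String)) : pvCombine c none = c := by
  cases c <;> rfl

lemma pvCombine_assoc (a b c : Option (Nat × String)) :
    pvCombine (pvCombine a b) c = pvCombine a (pvCombine b c) := by
  rcases a with _ | ⟨ta, sa⟩
  · rfl
  rcases b with _ | ⟨tb, sb⟩
  · rw [pvCombine_none_right, pvCombine_none_left]
  rcases c with _ | ⟨tc, sc⟩
  · rw [pvCombine_none_right, pvCombine_none_right]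
  rcases Nat.lt_or_ge tb ta with h1 | h1 <;> rcases Nat.lt_or_ge tc tb with h2 | h2
  · have h3 : tc < ta := h2.trans h1
    simp [pvCombine, h1, h2, h3]
  · simp [pvCombine, h1, Nat.not_lt.mpr h2]
  · simp [pvCombine, Nat.not_lt.mpr h1, h2]
  · have h3 : ¬ tc < ta := by omega
    simp [pvCombine, Nat.not_lt.mpr h1, Nat.not_lt.mpr h2, h3]

lemma pvfoldl_step_eq {α : Type} (f : α → Option Nat) (key : α → String) (l : List α) :
    ∀ b, l.foldl (pvStepG f key) b = pvCombine b (pvBest f key l) := by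
  induction l with
  | nil => intro b; cases b <;> rfl
  | cons x l ih =>
    intro b
    have hb : pvBest f key (x :: l) = pvCombine (pvStepG f key none x) (pvBest f key l) := by
      simpa [pvBest, List.foldl_cons] using ih (pvStepG f key none x)
    calc (x :: l).foldl (pvStepG f key) b
        = l.foldl (pvStepG f key) (pvStepG f key b x) := by simp [List.foldl_cons]
      _ = pvCombine (pvStepG f key b x) (pvBest f key l) := ih _
      _ = pvCombine b (pvCombine (pvStepG f key none x) (pvBest f key l)) := by
          simp only [pvStepG, pvCombine_none_left]
          exact pvCombine_assoc _ _ _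
      _ = pvCombine b (pvBest f key (x :: l)) := by rw [hb]

lemma pvBest_cons {α : Type} (f : α → Option Nat) (key : α → String) (x : α) (l : List α) :
    pvBest f key (x :: l) = pvCombine ((f x).map (fun t => (t, key x))) (pvBest f key l) := by
  have := pvfoldl_step_eq f key l (pvStepG f key none x)
  simpa [pvBest, List.foldl_cons, pvStepG, pvCombine_none_left] using this

lemma pvMinT_none_aux {α : Type} (f : α → Option Nat) (l : List α)
    (h : pvMinT f l = none) : ∀ x ∈ l, f x = none := by
  induction l with
  | nil => simp
  | cons x l ih =>
    rw [pvMinT] at h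
    rcases hfx : f x with _ | s
    · rw [hfx] at h
      simp only [pvOmin] at h
      intro y hy
      rcases List.mem_cons.mp hy with rfl | hy
      · exact hfx
      · exact ih h y hy
    · rw [hfx] at h
      rcases hm : pvMinT f l with _ | m <;> rw [hm] at h <;> simp [pvOmin] at h

lemma pvMinT_mem {α : Type} (f : α → Option Nat) (l : List α) (t : Nat)
    (h : pvMinT f l = some t) : ∃ x ∈ l, f x = some t := by
  induction l generalizing t with
  | nil => simp [pvMinT] at h
  | cons x l ih =>
    rw [pvMinT] at h
    rcases hfx : f x with _ | s
    · rw [hfx] at h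
      simp only [pvOmin] at h
      obtain ⟨y, hy, hfy⟩ := ih t h
      exact ⟨y, List.mem_cons_of_mem _ hy, hfy⟩
    · rcases hm : pvMinT f l with _ | m
      · rw [hfx, hm] at h
        simp only [pvOmin, Option.some.injEq] at h
        exact ⟨x, List.mem_cons_self, by rw [hfx, h]⟩
      · rw [hfx, hm] at h
        simp only [pvOmin, Option.some.injEq] at h
        by_cases hsm : s ≤ m
        · exact ⟨x, List.mem_cons_self, by rw [hfx]; congr 1; omega⟩
        · obtain ⟨y, hy, hfy⟩ := ih t (hm.trans (by congr 1; omega))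
          exact ⟨y, List.mem_cons_of_mem _ hy, hfy⟩

lemma pvMinT_le {α : Type} (f : α → Option Nat) (l : List α) (t : Nat)
    (h : pvMinT f l = some t) : ∀ x ∈ l, ∀ s, f x = some s → t ≤ s := by
  induction l generalizing t with
  | nil => simp
  | cons x l ih =>
    intro y hy s hs
    rw [pvMinT] at h
    rcases hfx : f x with _ | u
    · rw [hfx] at h
      simp only [pvOmin] at h
      rcases List.mem_cons.mp hy with rfl | hy
      · rw [hfx] at hs; cases hs
      · exact ih t h y hy s hs
    · rcases hm : pvMinT f l with _ | m
      · rw [hfx, hm] at h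
        simp only [pvOmin, Option.some.injEq] at h
        rcases List.mem_cons.mp hy with rfl | hy
        · rw [hfx] at hs
          cases hs; omega
        · have := pvMinT_none_aux f l hm y hy
          rw [this] at hs; cases hs
      · rw [hfx, hm] at h
        simp only [pvOmin, Option.some.injEq] at h
        rcases List.mem_cons.mp hy with rfl | hy
        · rw [hfx] at hs
          cases hs; omega
        · have := ih m hm y hy s hs
          omega

lemma pvFind?_congr_mem {α : Type} (p q : α → Bool) (l : List α)
    (h : ∀ x ∈ l, p x = q x) : l.find? p = l.find? q := by
  induction l with
  | nil => rfl
  | cons x l ih =>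
    have hx := h x List.mem_cons_self
    rcases hpx : p x with _ | _
    · rw [List.find?_cons_of_neg (by simp [hpx]), List.find?_cons_of_neg (by simp [← hx, hpx])]
      exact ih fun y hy => h y (List.mem_cons_of_mem _ hy)
    · rw [List.find?_cons_of_pos (by simp [hpx]), List.find?_cons_of_pos (by simp [← hx, hpx])]

-- B's fold returns the first element of minimal tier
lemma pvBest_eq_minT {α : Type} (f : α → Option Nat) (key : α → String) (l : List α) :
    pvBest f key l =
      match pvMinT f l with
      | none => none
      | some t => (l.find? (fun x => f x == some t)).map (fun x => (t, key x)) := by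
  induction l with
  | nil => rfl
  | cons x l ih =>
    rw [pvBest_cons, ih, pvMinT]
    rcases hfx : f x with _ | t
    · rcases hm : pvMinT f l with _ | s
      · rfl
      · simp only [pvOmin, Option.map_none, pvCombine_none_left]
        rw [List.find?_cons_of_neg (by simp [hfx])]
    · rcases hm : pvMinT f l with _ | s
      · simp only [pvOmin, Option.map_some, pvCombine_none_right]
        rw [List.find?_cons_of_pos (by simp [hfx])]
        rfl
      · rcases hfl : l.find? (fun x => f x == some s) with _ | y
        · have := pvMinT_mem f l s hm
          obtain ⟨z, hz, hfz⟩ := this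
          rw [List.find?_eq_none] at hfl
          exact absurd (by simp [hfz] : (fun x => f x == some s) z = true) (by simpa using hfl z hz)
        · by_cases hts : t ≤ s
          · simp only [pvOmin, Option.map_some, hfl, pvCombine, Nat.min_eq_left hts]
            rw [List.find?_cons_of_pos (by simp [hfx])]
            simp only [Option.map_some]
            rw [if_neg (by omega)]
          · simp only [pvOmin, Option.map_some, hfl, pvCombine, Nat.min_eq_right (by omega : s ≤ t)]
            rw [List.find?_cons_of_neg (by simp [hfx]; omega)]
            rw [hfl]
            simp only [Option.map_some]
            rw [if_pos (by omega)]

lemma pvF_none {α : Type} (q1 q2 q3 q4 : α → Bool) (x : α)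
    (h : pvF q1 q2 q3 q4 x = none) :
    q1 x = false ∧ q2 x = false ∧ q3 x = false ∧ q4 x = false := by
  unfold pvF at h
  split_ifs at h
  simp_all

lemma pvF_range {α : Type} (q1 q2 q3 q4 : α → Bool) (x : α) (t : Nat)
    (h : pvF q1 q2 q3 q4 x = some t) : t = 1 ∨ t = 2 ∨ t = 3 ∨ t = 4 := by
  unfold pvF at h
  split_ifs at h <;> simp_all

lemma pvF_of_q1 {α : Type} (q1 q2 q3 q4 : α → Bool) (x : α) (h : q1 x = true) :
    pvF q1 q2 q3 q4 x = some 1 := by unfold pvF; simp [h]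

lemma pvF_of_q2 {α : Type} (q1 q2 q3 q4 : α → Bool) (x : α) (h1 : q1 x = false)
    (h : q2 x = true) : pvF q1 q2 q3 q4 x = some 2 := by unfold pvF; simp [h1, h]

lemma pvF_of_q3 {α : Type} (q1 q2 q3 q4 : α → Bool) (x : α) (h1 : q1 x = false)
    (h2 : q2 x = false) (h : q3 x = true) : pvF q1 q2 q3 q4 x = some 3 := by
  unfold pvF; simp [h1, h2, h]

lemma pvF_beq_one {α : Type} (q1 q2 q3 q4 : α → Bool) (x : α) :
    (pvF q1 q2 q3 q4 x == some 1) = q1 x := by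
  unfold pvF; split_ifs <;> simp_all

lemma pvF_beq_two {α : Type} (q1 q2 q3 q4 : α → Bool) (x : α) (h1 : q1 x = false) :
    (pvF q1 q2 q3 q4 x == some 2) = q2 x := by
  unfold pvF; split_ifs <;> simp_all

lemma pvF_beq_three {α : Type} (q1 q2 q3 q4 : α → Bool) (x : α) (h1 : q1 x = false)
    (h2 : q2 x = false) : (pvF q1 q2 q3 q4 x == some 3) = q3 x := by
  unfold pvF; split_ifs <;> simp_all

lemma pvF_beq_four {α : Type} (q1 q2 q3 q4 : α → Bool) (x : α) (h1 : q1 x = false)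
    (h2 : q2 x = false) (h3 : q3 x = false) : (pvF q1 q2 q3 q4 x == some 4) = q4 x := by
  unfold pvF; split_ifs <;> simp_all

-- A's four-pass chain also returns the first element of minimal tier
lemma pvChain_eq_minT {α : Type} (q1 q2 q3 q4 : α → Bool) (key : α → String) (l : List α) :
    pvChain q1 q2 q3 q4 key l =
      match pvMinT (pvF q1 q2 q3 q4) l with
      | none => none
      | some t => (l.find? (fun x => pvF q1 q2 q3 q4 x == some t)).map key := by
  rcases hm : pvMinT (pvF q1 q2 q3 q4) l with _ | t
  · have hall := pvMinT_none_aux _ l hm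
    have h1 : l.find? q1 = none :=
      List.find?_eq_none.mpr fun x hx => by simp [(pvF_none _ _ _ _ x (hall x hx)).1]
    have h2 : l.find? q2 = none :=
      List.find?_eq_none.mpr fun x hx => by simp [(pvF_none _ _ _ _ x (hall x hx)).2.1]
    have h3 : l.find? q3 = none :=
      List.find?_eq_none.mpr fun x hx => by simp [(pvF_none _ _ _ _ x (hall x hx)).2.2.1]
    have h4 : l.find? q4 = none :=
      List.find?_eq_none.mpr fun x hx => by simp [(pvF_none _ _ _ _ x (hall x hx)).2.2.2]
    unfold pvChain
    rw [h1, h2, h3, h4]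
    rfl
  · obtain ⟨x0, hx0, hfx0⟩ := pvMinT_mem _ l t hm
    have hle := pvMinT_le _ l t hm
    rcases pvF_range q1 q2 q3 q4 x0 t hfx0 with rfl | rfl | rfl | rfl
    · have hcg : l.find? q1 = l.find? (fun x => pvF q1 q2 q3 q4 x == some 1) :=
        pvFind?_congr_mem _ _ l fun x _ => (pvF_beq_one q1 q2 q3 q4 x).symm
      rcases hf : l.find? (fun x => pvF q1 q2 q3 q4 x == some 1) with _ | y
      · exact absurd (List.find?_eq_none.mp hf x0 hx0) (by simp [hfx0])
      · unfold pvChain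
        rw [hcg, hf]
        simp [hf]
    · have hq1 : ∀ x ∈ l, q1 x = false := by
        intro x hx
        by_contra hq
        have := hle x hx 1 (pvF_of_q1 q1 q2 q3 q4 x (by simpa using hq))
        omega
      have h1 : l.find? q1 = none := List.find?_eq_none.mpr fun x hx => by simp [hq1 x hx]
      have hcg : l.find? q2 = l.find? (fun x => pvF q1 q2 q3 q4 x == some 2) :=
        pvFind?_congr_mem _ _ l fun x hx => (pvF_beq_two q1 q2 q3 q4 x (hq1 x hx)).symm
      rcases hf : l.find? (fun x => pvF q1 q2 q3 q4 x == some 2) with _ | y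
      · exact absurd (List.find?_eq_none.mp hf x0 hx0) (by simp [hfx0])
      · unfold pvChain
        rw [h1, hcg, hf]
        simp [hf]
    · have hq1 : ∀ x ∈ l, q1 x = false := by
        intro x hx
        by_contra hq
        have := hle x hx 1 (pvF_of_q1 q1 q2 q3 q4 x (by simpa using hq))
        omega
      have hq2 : ∀ x ∈ l, q2 x = false := by
        intro x hx
        by_contra hq
        have := hle x hx 2 (pvF_of_q2 q1 q2 q3 q4 x (hq1 x hx) (by simpa using hq))
        omega
      have h1 : l.find? q1 = none := List.find?_eq_none.mpr fun x hx => by simp [hq1 x hx]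
      have h2 : l.find? q2 = none := List.find?_eq_none.mpr fun x hx => by simp [hq2 x hx]
      have hcg : l.find? q3 = l.find? (fun x => pvF q1 q2 q3 q4 x == some 3) :=
        pvFind?_congr_mem _ _ l fun x hx =>
          (pvF_beq_three q1 q2 q3 q4 x (hq1 x hx) (hq2 x hx)).symm
      rcases hf : l.find? (fun x => pvF q1 q2 q3 q4 x == some 3) with _ | y
      · exact absurd (List.find?_eq_none.mp hf x0 hx0) (by simp [hfx0])
      · unfold pvChain
        rw [h1, h2, hcg, hf]
        simp [hf]
    · have hq1 : ∀ x ∈ l, q1 x = false := by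
        intro x hx
        by_contra hq
        have := hle x hx 1 (pvF_of_q1 q1 q2 q3 q4 x (by simpa using hq))
        omega
      have hq2 : ∀ x ∈ l, q2 x = false := by
        intro x hx
        by_contra hq
        have := hle x hx 2 (pvF_of_q2 q1 q2 q3 q4 x (hq1 x hx) (by simpa using hq))
        omega
      have hq3 : ∀ x ∈ l, q3 x = false := by
        intro x hx
        by_contra hq
        have := hle x hx 3 (pvF_of_q3 q1 q2 q3 q4 x (hq1 x hx) (hq2 x hx) (by simpa using hq))
        omega
      have h1 : l.find? q1 = none := List.find?_eq_none.mpr fun x hx => by simp [hq1 x hx]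
      have h2 : l.find? q2 = none := List.find?_eq_none.mpr fun x hx => by simp [hq2 x hx]
      have h3 : l.find? q3 = none := List.find?_eq_none.mpr fun x hx => by simp [hq3 x hx]
      have hcg : l.find? q4 = l.find? (fun x => pvF q1 q2 q3 q4 x == some 4) :=
        pvFind?_congr_mem _ _ l fun x hx =>
          (pvF_beq_four q1 q2 q3 q4 x (hq1 x hx) (hq2 x hx) (hq3 x hx)).symm
      unfold pvChain
      rw [h1, h2, h3, hcg]

-- the four tier predicates of both programs, over the cleaned-up input
def pvU (ua : String) : String := PySem.Str.lower (PySem.Str.strip ua)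

def pvQ1 (ua : String) (x : String × List (String × String)) : Bool :=
  PySem.Str.lower x.1 == pvU ua

def pvQ2 (ua : String) (x : String × List (String × String)) : Bool :=
  PySem.Str.isIn (PySem.Str.lower x.1) (pvU ua)

def pvQ3 (ua : String) (x : String × List (String × String)) : Bool :=
  decide (4 ≤ PySem.Str.len (pvU ua)) && PySem.Str.isIn (pvU ua) (PySem.Str.lower x.1)

def pvQ4 (ua : String) (x : String × List (String × String)) : Bool :=
  PySem.Str.isIn (pvU ua) (PySem.Str.lower (PySem.Dict.getD ⟨x.2⟩ "description" ""))

lemma pvTier_eq (ua : String) (x : String × List (String × String)) :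
    pvTier (pvU ua) x = pvF (pvQ1 ua) (pvQ2 ua) (pvQ3 ua) (pvQ4 ua) x := rfl

lemma pvStep_eq (ua : String) (b : Option (Nat × String)) (x : String × List (String × String)) :
    pvStep (pvU ua) b x = pvStepG (pvF (pvQ1 ua) (pvQ2 ua) (pvQ3 ua) (pvQ4 ua)) Prod.fst b x := by
  unfold pvStep pvStepG
  rw [← pvTier_eq]
  rcases pvTier (pvU ua) x with _ | t <;> rcases b with _ | ⟨tb, sb⟩ <;> rfl

lemma pvB_eq (ua : String) (aa : List (String × List (String × String))) :
    match_action_py_alt ua aa =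
      (pvBest (pvF (pvQ1 ua) (pvQ2 ua) (pvQ3 ua) (pvQ4 ua)) Prod.fst aa).map (·.2) := by
  have : pvStep (pvU ua) = pvStepG (pvF (pvQ1 ua) (pvQ2 ua) (pvQ3 ua) (pvQ4 ua)) Prod.fst :=
    funext fun b => funext fun x => pvStep_eq ua b x
  show (aa.foldl (pvStep (pvU ua)) none).map (·.2) = _
  rw [this]
  rfl

lemma pvA_eq (ua : String) (aa : List (String × List (String × String))) :
    match_action_py ua aa = pvChain (pvQ1 ua) (pvQ2 ua) (pvQ3 ua) (pvQ4 ua) Prod.fst aa := by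
  by_cases haa : aa = []
  · subst haa; rfl
  · simp only [match_action_py, pvChain]
    rw [if_neg haa]
    have hguard : (if 4 ≤ PySem.Str.len (PySem.Str.lower (PySem.Str.strip ua)) then
          List.find? (fun y => PySem.Str.isIn (PySem.Str.lower (PySem.Str.strip ua))
            (PySem.Str.lower y.1)) aa
        else none) = List.find? (pvQ3 ua) aa := by
      split_ifs with hg
      · refine pvFind?_congr_mem _ _ _ fun y _ => ?_
        have hg' : 4 ≤ (PySem.Chars.lower (PySem.Chars.strip ua.toList)).length := by
          simpa [pysem] using hg
        simp [pvQ3, pvU, hg']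
      · refine (List.find?_eq_none.mpr fun y _ => ?_).symm
        have hg' : ¬ 4 ≤ (PySem.Chars.lower (PySem.Chars.strip ua.toList)).length := by
          simpa [pysem] using hg
        simp [pvQ3, pvU, hg']
    simp only [hguard]
    rw [show (fun x : String × List (String × String) =>
          PySem.Str.lower x.1 == PySem.Str.lower (PySem.Str.strip ua)) = pvQ1 ua from rfl,
        show (fun x : String × List (String × String) =>
          PySem.Str.isIn (PySem.Str.lower x.1) (PySem.Str.lower (PySem.Str.strip ua))) = pvQ2 ua from rfl,
        show (fun x : String × List (String × String) =>
          PySem.Str.isIn (PySem.Str.lower (PySem.Str.strip ua))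
            (PySem.Str.lower (PySem.Dict.getD ⟨x.2⟩ "description" ""))) = pvQ4 ua from rfl]
    rcases List.find? (pvQ1 ua) aa with _ | y
    · rcases List.find? (pvQ2 ua) aa with _ | y
      · rcases List.find? (pvQ3 ua) aa with _ | y <;> rfl
      · rfl
    · rfl

-- ===== VERDICT (by name: the statement is the Claim_ definition above) =====
theorem match_action_py_spec : Claim_equal_match_action_py := by
  intro ua aa _
  unfold Spec_match_action_py
  rw [pvA_eq, pvB_eq, pvChain_eq_minT, pvBest_eq_minT]
  rcases pvMinT (pvF (pvQ1 ua) (pvQ2 ua) (pvQ3 ua) (pvQ4 ua)) aa with _ | t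
  · rfl
  · show Option.map Prod.fst
        (List.find? (fun x => pvF (pvQ1 ua) (pvQ2 ua) (pvQ3 ua) (pvQ4 ua) x == some t) aa)
      = Option.map (fun x => x.2) (Option.map (fun x => (t, x.1))
        (List.find? (fun x => pvF (pvQ1 ua) (pvQ2 ua) (pvQ3 ua) (pvQ4 ua) x == some t) aa))
    rcases List.find? (fun x => pvF (pvQ1 ua) (pvQ2 ua) (pvQ3 ua) (pvQ4 ua) x == some t) aa
      with _ | y <;> rfl
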